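-- pv_equiv track=rewrite | github.com/MichaelSlin/Dropsli | processing/module_parameters.py | find_leftmost_and_rightmost_points
-- ===== SOURCE A (Python) =====
-- def find_leftmost_and_rightmost_points(largest_contour, line_coordinates) -> tuple[tuple, tuple, bool]:
--     # Define the oblique line based on the selected points
--     (x1, y1), (x2, y2) = line_coordinates
--
--     # Find the leftmost and rightmost contact points
--     leftmost = None
--     rightmost = None
--     touch = False
--     for point in largest_contour:
--         px, py = point[0]
--         y_line = int(y1 + (y2 - y1) * (px - x1) / (x2 - x1))
--         if abs(py - y_line) <= 1:  # Check if the point is near the blue line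
--             if leftmost is None or px < leftmost[0]:
--                 leftmost = (px, py)
--             if rightmost is None or px > rightmost[0]:
--                 rightmost = (px, py)
--
--     if leftmost and rightmost:
--         touch = True
--
--     return leftmost, rightmost, touch
-- ===== SOURCE B (Python) =====
-- def find_leftmost_and_rightmost_points(largest_contour, line_coordinates) -> tuple[tuple, tuple, bool]:
--     (x1, y1), (x2, y2) = line_coordinates
--
--     # Phase 1: collect all contour points near the line, in order.
--     candidates = []
--     for point in largest_contour:
--         px, py = point[0]
--         y_line = int(y1 + (y2 - y1) * (px - x1) / (x2 - x1))
--         if abs(py - y_line) <= 1: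
--             candidates.append((px, py))
--
--     # Phase 2: derive the answers by reductions over the candidate list.
--     leftmost = min(candidates, key=lambda p: p[0]) if candidates else None
--     rightmost = max(candidates, key=lambda p: p[0]) if candidates else None
--     return leftmost, rightmost, bool(candidates)
-- ===== Notes on version B (the rewrite author's own statement) =====
-- stated objective: simpler
-- what changed: Replaces the fused min/max-tracking loop with a filter phase building the list of near-line candidate points followed by two plain min/max reductions keyed on x (first occurrence on ties, matching A's strict-inequality updates); touch is simply non-emptiness of the candidate list.
import Mathlib
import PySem

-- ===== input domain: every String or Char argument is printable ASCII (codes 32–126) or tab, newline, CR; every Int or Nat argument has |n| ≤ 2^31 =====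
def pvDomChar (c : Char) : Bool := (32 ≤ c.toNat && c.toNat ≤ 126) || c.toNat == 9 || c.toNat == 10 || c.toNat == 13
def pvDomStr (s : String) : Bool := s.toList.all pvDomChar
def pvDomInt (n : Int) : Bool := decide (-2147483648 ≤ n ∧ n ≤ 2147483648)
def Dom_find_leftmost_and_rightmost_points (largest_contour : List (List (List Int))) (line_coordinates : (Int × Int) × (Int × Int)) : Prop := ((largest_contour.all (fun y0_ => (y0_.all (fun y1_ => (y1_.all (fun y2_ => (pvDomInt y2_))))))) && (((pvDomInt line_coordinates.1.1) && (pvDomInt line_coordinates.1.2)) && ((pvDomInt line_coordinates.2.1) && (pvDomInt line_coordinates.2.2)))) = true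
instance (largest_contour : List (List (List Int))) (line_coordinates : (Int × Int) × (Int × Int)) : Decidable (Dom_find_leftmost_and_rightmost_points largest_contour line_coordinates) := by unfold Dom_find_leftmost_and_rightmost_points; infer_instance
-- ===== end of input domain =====

-- B builds the ordered list of near-line candidate points first and then takes min/max by x
-- (first occurrence on ties, as Python's min/max do), instead of A's fused min/max-tracking loop;
-- same O(n) cost, simpler decomposition. Both Pythons contain the identical expression
-- int(y1 + (y2 - y1) * (px - x1) / (x2 - x1)); the shared helper pyYLine below models it exactly
-- (IEEE-754 double division and addition with round-to-nearest-even, then truncation toward zero),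
-- which is exact for the |int| ≤ 2^31 domain (no overflow/subnormals arise there).

-- round-to-nearest-even IEEE double of num/den (den > 0), returned as (m, e) with value m * 2^e
def pvRoundRat (num : Int) (den : Int) : Int × Int :=
  if num = 0 then (0, 0) else
    let s : Int := if 0 < num then 1 else -1
    let A : Nat := num.natAbs
    let B : Nat := den.natAbs
    let E : Int :=
      let E0 : Int := (Nat.log2 A : Int) - (Nat.log2 B : Int)
      if (if 0 ≤ E0 then B * 2 ^ E0.toNat ≤ A else B ≤ A * 2 ^ (-E0).toNat) then E0 else E0 - 1
    let shift : Int := 52 - E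
    let N : Nat := if 0 ≤ shift then A * 2 ^ shift.toNat else A
    let D : Nat := if 0 ≤ shift then B else B * 2 ^ (-shift).toNat
    let q : Nat := N / D
    let r : Nat := N % D
    let q : Nat := if D < 2 * r ∨ (2 * r = D ∧ q % 2 = 1) then q + 1 else q
    if q = 2 ^ 53 then (s * 2 ^ 52, E - 51) else (s * (q : Int), E - 52)

-- int(·) of a double m * 2^e: truncation toward zero
def pvFloatTrunc (m : Int) (e : Int) : Int :=
  if 0 ≤ e then m * 2 ^ e.toNat
  else (if 0 ≤ m then 1 else -1) * ((m.natAbs / 2 ^ (-e).toNat : Nat) : Int)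

-- int(y1 + (y2 - y1) * (px - x1) / (x2 - x1)) with CPython double semantics; x2 = x1
-- (ZeroDivisionError) is excluded by Pre_, the value returned there is junk.
def pyYLine (x1 y1 x2 y2 px : Int) : Int :=
  let a := (y2 - y1) * (px - x1)
  let b := x2 - x1
  let ab := if b < 0 then (-a, -b) else (a, b)
  let me := pvRoundRat ab.1 ab.2
  let me2 :=
    if 0 ≤ me.2 then pvRoundRat (y1 + me.1 * 2 ^ me.2.toNat) 1
    else pvRoundRat (y1 * 2 ^ (-me.2).toNat + me.1) (2 ^ (-me.2).toNat)
  pvFloatTrunc me2.1 me2.2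

-- ===== PORT A =====
def find_leftmost_and_rightmost_points (largest_contour : List (List (List Int))) (line_coordinates : (Int × Int) × (Int × Int)) : (Option (Int × Int)) × (Option (Int × Int)) × Bool :=
  let x1 := line_coordinates.1.1
  let y1 := line_coordinates.1.2
  let x2 := line_coordinates.2.1
  let y2 := line_coordinates.2.2
  let st := largest_contour.foldl
    (fun (st : Option (Int × Int) × Option (Int × Int)) point =>
      let p0 := PySem.List.pyGetD point 0 []
      let px := PySem.List.pyGetD p0 0 0
      let py := PySem.List.pyGetD p0 1 0
      let y_line := pyYLine x1 y1 x2 y2 px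
      if |py - y_line| ≤ 1 then
        (match st.1 with
          | none => some (px, py)
          | some m => if px < m.1 then some (px, py) else some m,
         match st.2 with
          | none => some (px, py)
          | some m => if m.1 < px then some (px, py) else some m)
      else st)
    (none, none)
  let touch := st.1.isSome && st.2.isSome
  (st.1, st.2, touch)

-- ===== PORT B =====
def find_leftmost_and_rightmost_points_alt (largest_contour : List (List (List Int))) (line_coordinates : (Int × Int) × (Int × Int)) : (Option (Int × Int)) × (Option (Int × Int)) × Bool :=
  let x1 := line_coordinates.1.1
  let y1 := line_coordinates.1.2
  let x2 := line_coordinates.2.1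
  let y2 := line_coordinates.2.2
  let candidates := largest_contour.foldl
    (fun (acc : List (Int × Int)) point =>
      let p0 := PySem.List.pyGetD point 0 []
      let px := PySem.List.pyGetD p0 0 0
      let py := PySem.List.pyGetD p0 1 0
      let y_line := pyYLine x1 y1 x2 y2 px
      if |py - y_line| ≤ 1 then acc ++ [(px, py)] else acc)
    []
  let leftmost := PySem.List.min? candidates (fun p => p.1)
  let rightmost := PySem.List.max? candidates (fun p => p.1)
  (leftmost, rightmost, !candidates.isEmpty)

-- ===== PRECONDITION & SPEC =====
-- Pre_ excludes exactly the inputs where A raises: a nonempty contour with x2 = x1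
-- (ZeroDivisionError), or a point whose point[0] is missing or not a pair (IndexError/ValueError).
def Pre_find_leftmost_and_rightmost_points (largest_contour : List (List (List Int))) (line_coordinates : (Int × Int) × (Int × Int)) : Prop :=
  largest_contour = [] ∨
    (line_coordinates.2.1 ≠ line_coordinates.1.1 ∧
      ∀ point ∈ largest_contour, point ≠ [] ∧ (point.headD []).length = 2)
instance (largest_contour : List (List (List Int))) (line_coordinates : (Int × Int) × (Int × Int)) : Decidable (Pre_find_leftmost_and_rightmost_points largest_contour line_coordinates) := by unfold Pre_find_leftmost_and_rightmost_points; infer_instance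
def pvWitness_find_leftmost_and_rightmost_points : List (List (List Int)) × ((Int × Int) × (Int × Int)) := ([[[0, 0]], [[3, 1]]], ((0, 0), (4, 2)))

def Spec_find_leftmost_and_rightmost_points (largest_contour : List (List (List Int))) (line_coordinates : (Int × Int) × (Int × Int)) (out : (Option (Int × Int)) × (Option (Int × Int)) × Bool) : Prop := out = find_leftmost_and_rightmost_points_alt largest_contour line_coordinates
instance (largest_contour : List (List (List Int))) (line_coordinates : (Int × Int) × (Int × Int)) (out : (Option (Int × Int)) × (Option (Int × Int)) × Bool) : Decidable (Spec_find_leftmost_and_rightmost_points largest_contour line_coordinates out) := by unfold Spec_find_leftmost_and_rightmost_points; infer_instance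

-- ===== CLAIM (what is proved, stated in full; the proofs are below) =====
def Claim_equal_find_leftmost_and_rightmost_points : Prop := ∀ (largest_contour : List (List (List Int))) (line_coordinates : (Int × Int) × (Int × Int)), Dom_find_leftmost_and_rightmost_points largest_contour line_coordinates → Pre_find_leftmost_and_rightmost_points largest_contour line_coordinates → Spec_find_leftmost_and_rightmost_points largest_contour line_coordinates (find_leftmost_and_rightmost_points largest_contour line_coordinates)

-- ===== LEMMAS AND PROOFS =====

-- min over acc ++ [v] is one update step of Python's first-extremal min on min over acc
lemma pv_min_append (acc : List (Int × Int)) (v : Int × Int) :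
    PySem.List.min? (acc ++ [v]) (fun q => q.1)
      = match PySem.List.min? acc (fun q => q.1) with
        | none => some v
        | some m => if v.1 < m.1 then some v else some m := by
  cases h : PySem.List.min? acc (fun q => q.1) with
  | none =>
    have hnil : acc = [] := (PySem.List.min?_eq_none_iff _ _).mp h
    subst hnil; rfl
  | some m =>
    unfold PySem.List.min? at h ⊢
    rw [List.foldl_append, h]
    rfl

lemma pv_max_append (acc : List (Int × Int)) (v : Int × Int) :
    PySem.List.max? (acc ++ [v]) (fun q => q.1)
      = match PySem.List.max? acc (fun q => q.1) with
        | none => some v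
        | some m => if m.1 < v.1 then some v else some m := by
  cases h : PySem.List.max? acc (fun q => q.1) with
  | none =>
    have hnil : acc = [] := (PySem.List.max?_eq_none_iff _ _).mp h
    subst hnil; rfl
  | some m =>
    unfold PySem.List.max? at h ⊢
    rw [List.foldl_append, h]
    rfl

-- A's fused min/max-tracking fold computes min/max of B's candidate list
lemma pv_fold_eq (x1 y1 x2 y2 : Int) (cs : List (List (List Int))) (acc : List (Int × Int)) :
    cs.foldl
      (fun (st : Option (Int × Int) × Option (Int × Int)) point =>
        let p0 := PySem.List.pyGetD point 0 []
        let px := PySem.List.pyGetD p0 0 0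
        let py := PySem.List.pyGetD p0 1 0
        let y_line := pyYLine x1 y1 x2 y2 px
        if |py - y_line| ≤ 1 then
          (match st.1 with
            | none => some (px, py)
            | some m => if px < m.1 then some (px, py) else some m,
           match st.2 with
            | none => some (px, py)
            | some m => if m.1 < px then some (px, py) else some m)
        else st)
      (PySem.List.min? acc (fun q => q.1), PySem.List.max? acc (fun q => q.1))
    = (PySem.List.min?
        (cs.foldl (fun (a : List (Int × Int)) point =>
          let p0 := PySem.List.pyGetD point 0 []
          let px := PySem.List.pyGetD p0 0 0
          let py := PySem.List.pyGetD p0 1 0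
          let y_line := pyYLine x1 y1 x2 y2 px
          if |py - y_line| ≤ 1 then a ++ [(px, py)] else a) acc) (fun q => q.1),
       PySem.List.max?
        (cs.foldl (fun (a : List (Int × Int)) point =>
          let p0 := PySem.List.pyGetD point 0 []
          let px := PySem.List.pyGetD p0 0 0
          let py := PySem.List.pyGetD p0 1 0
          let y_line := pyYLine x1 y1 x2 y2 px
          if |py - y_line| ≤ 1 then a ++ [(px, py)] else a) acc) (fun q => q.1)) := by
  induction cs generalizing acc with
  | nil => rfl
  | cons c cs ih =>
    simp only [List.foldl_cons]
    by_cases h : |PySem.List.pyGetD (PySem.List.pyGetD c 0 []) 1 0 -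
        pyYLine x1 y1 x2 y2 (PySem.List.pyGetD (PySem.List.pyGetD c 0 []) 0 0)| ≤ 1
    · simp only [if_pos h]
      rw [← pv_min_append, ← pv_max_append]
      exact ih (acc ++ [(PySem.List.pyGetD (PySem.List.pyGetD c 0 []) 0 0,
        PySem.List.pyGetD (PySem.List.pyGetD c 0 []) 1 0)])
    · simp only [if_neg h]
      exact ih acc

-- both isSome-flags of min/max agree with non-emptiness of the candidate list
lemma pv_touch (l : List (Int × Int)) :
    ((PySem.List.min? l (fun q => q.1)).isSome && (PySem.List.max? l (fun q => q.1)).isSome)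
      = !l.isEmpty := by
  cases l with
  | nil => rfl
  | cons x t =>
    simp [Option.isSome_iff_ne_none, Ne, PySem.List.min?_eq_none_iff, PySem.List.max?_eq_none_iff]

-- ===== VERDICT (by name: the statement is the Claim_ definition above) =====
theorem find_leftmost_and_rightmost_points_spec : Claim_equal_find_leftmost_and_rightmost_points := by
  intro largest_contour line_coordinates _ _
  unfold Spec_find_leftmost_and_rightmost_points
  unfold find_leftmost_and_rightmost_points find_leftmost_and_rightmost_points_alt
  simp only []
  rw [show ((none, none) : Option (Int × Int) × Option (Int × Int))
        = (PySem.List.min? ([] : List (Int × Int)) (fun q => q.1),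
           PySem.List.max? ([] : List (Int × Int)) (fun q => q.1)) from rfl]
  rw [pv_fold_eq]
  rw [pv_touch]
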